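-- pv_equiv track=rewrite | github.com/jsinghw/backend-nested-brackets | nested.py | valid_square_bracket
-- ===== SOURCE A (Python) =====
-- def valid_square_bracket(string):
--     cnt = 0
--     pos = 0
--     for char in string:
--         if char == '[':
--             cnt += 1
--         if char == ']':
--             cnt -= 1
--         if cnt < 0:
--             return('NO ' + str(pos))
--         pos += 1
--     if cnt == 0:
--         return('YES')
--     else:
--         return('NO ' + str(pos))
-- ===== SOURCE B (Python) =====
-- def valid_square_bracket(string):
--     # two-pass: materialize the running-depth prefix sums, then locate the first error
--     depths = []
--     d = 0
--     for c in string: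
--         d += (c == '[') - (c == ']')
--         depths.append(d)
--     bad = [i for i, v in enumerate(depths) if v < 0]
--     if bad:
--         return 'NO ' + str(bad[0])
--     return 'YES' if d == 0 else 'NO ' + str(len(string))
-- ===== Notes on version B (the rewrite author's own statement) =====
-- stated objective: alternative
-- what changed: Replaces A's single early-returning loop with counter and position tracking by a two-pass prefix-sum decomposition: first materialize the running-depth list, then search it for the first negative index, and finally judge the total.
import Mathlib
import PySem

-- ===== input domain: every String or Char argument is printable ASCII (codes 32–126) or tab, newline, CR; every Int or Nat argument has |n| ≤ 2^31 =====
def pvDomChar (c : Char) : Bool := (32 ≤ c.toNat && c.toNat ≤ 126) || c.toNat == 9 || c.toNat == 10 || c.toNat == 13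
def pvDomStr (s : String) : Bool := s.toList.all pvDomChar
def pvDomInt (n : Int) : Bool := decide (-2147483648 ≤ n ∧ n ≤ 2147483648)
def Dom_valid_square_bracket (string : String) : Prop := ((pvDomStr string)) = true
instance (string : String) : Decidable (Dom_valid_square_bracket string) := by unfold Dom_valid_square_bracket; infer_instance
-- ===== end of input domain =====

-- B replaces A's single early-returning counter loop by a two-pass prefix-sum
-- decomposition (materialized depth list, then a search for the first negative);
-- same cost, alternative structure.

-- ===== PORT A =====
def vsbLoopA : List Char → Int → Int → String
  | [], cnt, pos => if cnt = 0 then "YES" else "NO " ++ PySem.Int.toStr pos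
  | c :: rest, cnt, pos =>
    let cnt1 := if c == '[' then cnt + 1 else cnt
    let cnt2 := if c == ']' then cnt1 - 1 else cnt1
    if cnt2 < 0 then "NO " ++ PySem.Int.toStr pos
    else vsbLoopA rest cnt2 (pos + 1)

def valid_square_bracket (string : String) : String :=
  vsbLoopA string.toList 0 0

-- ===== PORT B =====
-- d += (c == '[') - (c == ']')
def vsb_delta (c : Char) : Int :=
  (if c == '[' then (1 : Int) else 0) - (if c == ']' then (1 : Int) else 0)

def valid_square_bracket_alt (string : String) : String :=
  let acc := string.toList.foldl
    (fun (p : List Int × Int) c =>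
      let d := p.2 + vsb_delta c
      (p.1 ++ [d], d)) ([], 0)
  let bad := ((PySem.List.enumerate acc.1 0).filter (fun q => q.2 < 0)).map Prod.fst
  match bad with
  | i :: _ => "NO " ++ PySem.Int.toStr i
  | [] => if acc.2 = 0 then "YES" else "NO " ++ PySem.Int.toStr (string.toList.length : Int)

-- ===== PRECONDITION & SPEC =====
def Spec_valid_square_bracket (string : String) (out : String) : Prop := out = valid_square_bracket_alt string
instance (string : String) (out : String) : Decidable (Spec_valid_square_bracket string out) := by unfold Spec_valid_square_bracket; infer_instance

-- ===== CLAIM (what is proved, stated in full; the proofs are below) =====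
def Claim_equal_valid_square_bracket : Prop := ∀ (string : String), Dom_valid_square_bracket string → Spec_valid_square_bracket string (valid_square_bracket string)

-- ===== LEMMAS AND PROOFS =====

/-- the prefix-depth sequence starting from count `cnt` -/
def vsbPref (cnt : Int) : List Char → List Int
  | [] => []
  | c :: r => (cnt + vsb_delta c) :: vsbPref (cnt + vsb_delta c) r

def vsbSum (l : List Char) : Int := (l.map vsb_delta).sum

lemma vsb_fold (l : List Char) : ∀ (acc : List Int) (cnt : Int),
    l.foldl (fun (p : List Int × Int) c =>
      let d := p.2 + vsb_delta c
      (p.1 ++ [d], d)) (acc, cnt)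
    = (acc ++ vsbPref cnt l, cnt + vsbSum l) := by
  induction l with
  | nil => intro acc cnt; simp [vsbSum, vsbPref]
  | cons c r ih =>
    intro acc cnt
    simp only [List.foldl_cons, ih, vsbPref, vsbSum, List.map_cons, List.sum_cons]
    refine Prod.ext ?_ ?_
    · simp
    · simp; ring

lemma vsb_cnt2 (c : Char) (cnt : Int) :
    (if c == ']' then (if c == '[' then cnt + 1 else cnt) - 1
     else (if c == '[' then cnt + 1 else cnt)) = cnt + vsb_delta c := by
  unfold vsb_delta
  by_cases h1 : c = '[' <;> by_cases h2 : c = ']' <;>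
    simp_all <;> omega

lemma vsb_main (l : List Char) : ∀ (cnt pos : Int),
    vsbLoopA l cnt pos =
      (match (((PySem.List.enumerate (vsbPref cnt l) pos).filter
          (fun q => q.2 < 0)).map Prod.fst) with
       | i :: _ => "NO " ++ PySem.Int.toStr i
       | [] => if cnt + vsbSum l = 0 then "YES"
               else "NO " ++ PySem.Int.toStr (pos + l.length)) := by
  induction l with
  | nil =>
    intro cnt pos
    simp [vsbLoopA, vsbPref, vsbSum]
  | cons c r ih =>
    intro cnt pos
    have hc := vsb_cnt2 c cnt
    simp only [vsbLoopA, hc, vsbPref, PySem.List.enumerate_cons, List.filter_cons]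
    by_cases hneg : cnt + vsb_delta c < 0
    · simp [hneg]
    · have : cnt + vsbSum (c :: r) = (cnt + vsb_delta c) + vsbSum r := by
        simp [vsbSum]; ring
      simp only [hneg, decide_eq_true_eq]
      rw [ih (cnt + vsb_delta c) (pos + 1), this]
      have hlen : pos + (↑(c :: r).length : Int) = (pos + 1) + (r.length : Int) := by
        simp; ring
      rw [hlen]
      simp

-- ===== VERDICT (by name: the statement is the Claim_ definition above) =====
theorem valid_square_bracket_spec : Claim_equal_valid_square_bracket := by
  intro s _
  show valid_square_bracket s = valid_square_bracket_alt s
  unfold valid_square_bracket valid_square_bracket_alt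
  rw [vsb_fold s.toList [] 0, vsb_main s.toList 0 0]
  simp
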